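-- pv_equiv track=rewrite | github.com/CrazyForks/Mouser | core/startup.py | _desktop_exec_arg
-- ===== SOURCE A (Python) =====
-- def _desktop_exec_arg(arg: str) -> str:
--     if not arg:
--         return '""'
--     if all(ch not in arg for ch in ' \t\n"\\`$'):
--         return arg
--     escaped = (
--         arg.replace("\\", "\\\\")
--         .replace('"', '\\"')
--         .replace("`", "\\`")
--         .replace("$", "\\$")
--     )
--     return f'"{escaped}"'
-- ===== SOURCE B (Python) =====
-- def _desktop_exec_arg(arg: str) -> str:
--     if not arg:
--         return '""'
--     out = []
--     needs_quote = False
--     for ch in arg: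
--         if ch in '\\"`$':
--             out.append('\\')
--         out.append(ch)
--         if ch in ' \t\n"\\`$':
--             needs_quote = True
--     if needs_quote:
--         return '"' + ''.join(out) + '"'
--     return arg
-- ===== Notes on version B (the rewrite author's own statement) =====
-- stated objective: alternative
-- what changed: Replaced the 7-substring all()-scan plus four sequential .replace passes with a single explicit pass over the characters that simultaneously builds the escaped buffer and the needs-quote flag.
import Mathlib
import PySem

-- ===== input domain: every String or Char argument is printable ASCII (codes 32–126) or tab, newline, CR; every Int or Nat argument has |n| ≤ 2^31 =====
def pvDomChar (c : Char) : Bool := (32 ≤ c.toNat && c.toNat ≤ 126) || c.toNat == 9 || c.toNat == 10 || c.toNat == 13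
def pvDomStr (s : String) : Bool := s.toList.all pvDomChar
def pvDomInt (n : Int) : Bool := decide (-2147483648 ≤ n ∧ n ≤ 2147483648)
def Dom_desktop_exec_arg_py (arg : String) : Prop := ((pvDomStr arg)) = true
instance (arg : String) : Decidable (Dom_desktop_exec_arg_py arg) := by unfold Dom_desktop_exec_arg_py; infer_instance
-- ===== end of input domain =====

-- B replaces A's all()-substring-scan plus four sequential .replace passes with one
-- single pass that builds the escaped buffer and the needs-quote flag together.

-- ===== PORT A =====
def desktop_exec_arg_py (arg : String) : String :=
  if arg.toList.isEmpty then "\"\""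
  else if [' ', '\t', '\n', '"', '\\', '`', '$'].all
      (fun ch => !(PySem.Str.isIn (String.ofList [ch]) arg)) then arg
  else
    let escaped :=
      PySem.Str.replace
        (PySem.Str.replace
          (PySem.Str.replace
            (PySem.Str.replace arg "\\" "\\\\") "\"" "\\\"") "`" "\\`") "$" "\\$"
    String.ofList ('"' :: escaped.toList ++ ['"'])

-- ===== PORT B =====
def desktop_exec_arg_py_alt (arg : String) : String :=
  if arg.toList.isEmpty then "\"\""
  else
    let st := arg.toList.foldl
      (fun (st : List Char × Bool) ch =>
        let out := if ch ∈ ['\\', '"', '`', '$'] then st.1 ++ ['\\', ch] else st.1 ++ [ch]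
        let nq := if ch ∈ [' ', '\t', '\n', '"', '\\', '`', '$'] then true else st.2
        (out, nq))
      ([], false)
    if st.2 then String.ofList ('"' :: st.1 ++ ['"']) else arg

-- ===== PRECONDITION & SPEC =====
def Spec_desktop_exec_arg_py (arg : String) (out : String) : Prop := out = desktop_exec_arg_py_alt arg
instance (arg : String) (out : String) : Decidable (Spec_desktop_exec_arg_py arg out) := by unfold Spec_desktop_exec_arg_py; infer_instance

-- ===== CLAIM (what is proved, stated in full; the proofs are below) =====
def Claim_equal_desktop_exec_arg_py : Prop := ∀ (arg : String), Dom_desktop_exec_arg_py arg → Spec_desktop_exec_arg_py arg (desktop_exec_arg_py arg)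

-- ===== LEMMAS AND PROOFS =====

-- per-character escape performed by both programs
def pvEsc (c : Char) : List Char :=
  if c ∈ ['\\', '"', '`', '$'] then ['\\', c] else [c]

-- characters that force quoting
def pvTrig (c : Char) : Bool := c ∈ [' ', '\t', '\n', '"', '\\', '`', '$']

theorem pv_flatMap_assoc (l : List Char) (f g : Char → List Char) :
    (l.flatMap f).flatMap g = l.flatMap (fun c => (f c).flatMap g) := by
  induction l with
  | nil => rfl
  | cons c t ih => simp [List.flatMap_cons, List.flatMap_append, ih]

theorem pv_replace_go_single (o : Char) (new : List Char) :
    ∀ (l : List Char) (fuel : Nat) (acc : List Char), l.length ≤ fuel →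
      PySem.Chars.replace.go [o] new fuel l acc
        = acc.reverse ++ l.flatMap (fun c => if c = o then new else [c]) := by
  intro l
  induction l with
  | nil =>
    intro fuel acc _
    cases fuel <;> simp [PySem.Chars.replace.go.eq_def]
  | cons c t ih =>
    intro fuel acc hle
    cases fuel with
    | zero => simp at hle
    | succ f =>
      rw [PySem.Chars.replace.go.eq_def]
      by_cases hc : c = o
      · subst hc
        simp only [List.isPrefixOf, BEq.rfl, Bool.and_true,
          if_pos, List.length_cons, List.drop_succ_cons, List.length_nil, List.drop_zero]
        rw [ih f (new.reverse ++ acc) (by simpa using hle)]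
        simp [List.flatMap_cons]
      · have hpre : ([o].isPrefixOf (c :: t)) = false := by
          simp [List.isPrefixOf]
          exact fun h => absurd h (by simpa [eq_comm] using hc)
        simp only [hpre, Bool.false_eq_true, if_false]
        rw [ih f (c :: acc) (by simpa using Nat.le_of_succ_le_succ hle)]
        simp [List.flatMap_cons, hc]

theorem pv_replace_single (s : List Char) (o : Char) (new : List Char) :
    PySem.Chars.replace s [o] new = s.flatMap (fun c => if c = o then new else [c]) := by
  rw [PySem.Chars.replace]
  simp only [List.isEmpty_cons, Bool.false_eq_true, if_false]
  simpa using pv_replace_go_single o new s s.length [] (Nat.le_refl _)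

theorem pv_chain_eq_flatMap (l : List Char) :
    PySem.Chars.replace
      (PySem.Chars.replace
        (PySem.Chars.replace
          (PySem.Chars.replace l ['\\'] ['\\', '\\']) ['"'] ['\\', '"'])
        ['`'] ['\\', '`']) ['$'] ['\\', '$']
      = l.flatMap pvEsc := by
  rw [pv_replace_single, pv_replace_single, pv_replace_single, pv_replace_single,
    pv_flatMap_assoc, pv_flatMap_assoc, pv_flatMap_assoc]
  apply List.flatMap_congr
  intro c _
  by_cases h1 : c = '\\' <;> by_cases h2 : c = '"' <;> by_cases h3 : c = '`' <;>
    by_cases h4 : c = '$' <;> simp_all [pvEsc]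

theorem pv_foldl_spec (l : List Char) :
    ∀ (acc : List Char) (b : Bool),
      l.foldl
        (fun (st : List Char × Bool) ch =>
          let out := if ch ∈ ['\\', '"', '`', '$'] then st.1 ++ ['\\', ch] else st.1 ++ [ch]
          let nq := if ch ∈ [' ', '\t', '\n', '"', '\\', '`', '$'] then true else st.2
          (out, nq))
        (acc, b)
      = (acc ++ l.flatMap pvEsc, b || l.any pvTrig) := by
  induction l with
  | nil => intro acc b; simp
  | cons c t ih =>
    intro acc b
    rw [List.foldl_cons]
    show List.foldl _
        ((if c ∈ ['\\', '"', '`', '$'] then acc ++ ['\\', c] else acc ++ [c]),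
         (if c ∈ [' ', '\t', '\n', '"', '\\', '`', '$'] then true else b)) t = _
    split_ifs with h1 h2 h2 <;> rw [ih] <;>
      simp [pvEsc, pvTrig, h1, h2, List.flatMap_cons]

theorem pv_isIn_singleton (c : Char) (s : String) :
    PySem.Str.isIn (String.ofList [c]) s = true ↔ c ∈ s.toList := by
  rw [PySem.Str.isIn_iff_infix]
  constructor
  · intro h
    have : [c].Sublist s.toList := by
      simpa using h.sublist
    exact List.singleton_sublist.mp this
  · intro h
    obtain ⟨u, v, huv⟩ := List.append_of_mem h
    exact ⟨u, v, by simp [huv]⟩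

theorem pv_allscan_eq (arg : String) :
    ([' ', '\t', '\n', '"', '\\', '`', '$'].all
      (fun ch => !(PySem.Str.isIn (String.ofList [ch]) arg)) = true)
      ↔ (arg.toList.any pvTrig = false) := by
  simp only [List.all_eq_true, Bool.not_eq_true', List.any_eq_false]
  constructor
  · intro h c hc hcontra
    have := h c (by simpa [pvTrig] using hcontra)
    rw [← Bool.not_eq_true, pv_isIn_singleton] at this
    exact this hc
  · intro h ch hch
    rw [← Bool.not_eq_true, pv_isIn_singleton]
    intro hmem
    exact (h ch hmem) (by simpa [pvTrig] using hch)

-- ===== VERDICT (by name: the statement is the Claim_ definition above) =====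
theorem desktop_exec_arg_py_spec : Claim_equal_desktop_exec_arg_py := by
  intro arg _
  unfold Spec_desktop_exec_arg_py desktop_exec_arg_py desktop_exec_arg_py_alt
  by_cases he : arg.toList.isEmpty
  · simp [he]
  · simp only [he, Bool.false_eq_true, if_false]
    rw [pv_foldl_spec]
    by_cases hq : arg.toList.any pvTrig
    · have hall : ([' ', '\t', '\n', '"', '\\', '`', '$'].all
        (fun ch => !(PySem.Str.isIn (String.ofList [ch]) arg))) = false := by
        rw [Bool.eq_false_iff]
        intro h
        rw [pv_allscan_eq arg] at h
        rw [h] at hq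
        exact Bool.false_ne_true hq
      have hesc : (PySem.Str.replace (PySem.Str.replace (PySem.Str.replace
          (PySem.Str.replace arg "\\" "\\\\") "\"" "\\\"") "`" "\\`") "$" "\\$").toList
          = arg.toList.flatMap pvEsc := by
        rw [PySem.Str.toList_replace, PySem.Str.toList_replace, PySem.Str.toList_replace,
          PySem.Str.toList_replace]
        exact pv_chain_eq_flatMap arg.toList
      simp only [hall, Bool.false_eq_true, if_false, Bool.false_or, hq, if_true, List.nil_append]
      rw [hesc]
    · have hall : ([' ', '\t', '\n', '"', '\\', '`', '$'].all
        (fun ch => !(PySem.Str.isIn (String.ofList [ch]) arg))) = true :=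
        (pv_allscan_eq arg).mpr (Bool.eq_false_iff.mpr hq)
      have hq' : arg.toList.any pvTrig = false := Bool.eq_false_iff.mpr hq
      simp only [hall, if_true, Bool.false_or, hq', Bool.false_eq_true, if_false]
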